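-- pv_equiv track=rewrite | github.com/batatovich/tesis | supra_converter.py | ind_supra_node
-- ===== SOURCE A (Python) =====
-- def ind_supra_node(supra_node, t_nodes): #Index supra nodes in tree way order (time->node index)
--     t = supra_node[1]
--     ind = 0
--     for t_node in t_nodes:
--         if t_node[0] == t: #If time is the same
--             ind += t_node[1].index(supra_node[0])
--             break
--         else:
--             ind += len(t_node[1])
--     return ind
-- ===== SOURCE B (Python) =====
-- def ind_supra_node(supra_node, t_nodes):
--     node, t = supra_node
--     flat = [(tn[0], x) for tn in t_nodes for x in tn[1]]
--     if (t, node) in flat: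
--         return flat.index((t, node))
--     return len(flat)
-- ===== Notes on version B (the rewrite author's own statement) =====
-- stated objective: alternative
-- what changed: B flattens t_nodes once into a global list of (time, node) pairs and returns the index of (t, node) in that flat list (total length if absent), instead of A's per-block loop with an accumulator, a time comparison and an inner .index per block.
import Mathlib
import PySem

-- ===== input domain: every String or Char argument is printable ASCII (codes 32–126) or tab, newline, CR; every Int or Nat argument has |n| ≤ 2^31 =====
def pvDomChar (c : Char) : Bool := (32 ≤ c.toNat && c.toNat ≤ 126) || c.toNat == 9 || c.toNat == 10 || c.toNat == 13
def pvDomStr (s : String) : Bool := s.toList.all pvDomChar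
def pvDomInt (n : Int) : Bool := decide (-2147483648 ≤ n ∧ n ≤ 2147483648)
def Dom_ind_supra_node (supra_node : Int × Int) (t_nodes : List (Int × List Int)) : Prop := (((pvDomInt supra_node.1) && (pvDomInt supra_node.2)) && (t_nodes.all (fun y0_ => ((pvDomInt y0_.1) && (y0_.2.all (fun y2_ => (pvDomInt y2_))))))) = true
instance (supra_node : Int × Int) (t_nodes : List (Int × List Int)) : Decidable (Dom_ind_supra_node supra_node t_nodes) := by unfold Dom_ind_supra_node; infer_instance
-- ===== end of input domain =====

-- B flattens t_nodes into one global list of (time,node) pairs and searches it once,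
-- replacing A's per-block accumulator loop (objective: alternative decomposition, same cost).


-- ===== PORT A =====
-- A's for-loop with accumulator `ind`; `.index` raises ValueError when the node is
-- absent from the matching block — `index?` is none exactly there (excluded by Pre_; `.getD 0` is never used inside Pre_).
def pvAloop (node t : Int) : List (Int × List Int) → Int → Int
  | [], ind => ind
  | b :: rest, ind =>
    if b.1 == t then ind + (((PySem.List.index? b.2 node).getD 0 : Nat) : Int)
    else pvAloop node t rest (ind + (b.2.length : Int))

def ind_supra_node (supra_node : Int × Int) (t_nodes : List (Int × List Int)) : Int :=
  pvAloop supra_node.1 supra_node.2 t_nodes 0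

-- ===== PORT B =====
-- Source B's local `flat` comprehension, as a named helper
def pvFlat (t_nodes : List (Int × List Int)) : List (Int × Int) :=
  t_nodes.flatMap (fun b => b.2.map (fun x => (b.1, x)))

def ind_supra_node_alt (supra_node : Int × Int) (t_nodes : List (Int × List Int)) : Int :=
  if (supra_node.2, supra_node.1) ∈ pvFlat t_nodes then
    (((PySem.List.index? (pvFlat t_nodes) (supra_node.2, supra_node.1)).getD 0 : Nat) : Int)
  else ((pvFlat t_nodes).length : Int)

-- ===== PRECONDITION & SPEC =====
-- Pre_ excludes exactly the inputs where A raises ValueError: a block with the sought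
-- time exists (first such block) but the node is not in that block's node list.
def Pre_ind_supra_node (supra_node : Int × Int) (t_nodes : List (Int × List Int)) : Prop :=
  ((t_nodes.find? (fun b => b.1 == supra_node.2)).all (fun b => b.2.contains supra_node.1)) = true
instance (supra_node : Int × Int) (t_nodes : List (Int × List Int)) : Decidable (Pre_ind_supra_node supra_node t_nodes) := by unfold Pre_ind_supra_node; infer_instance

def pvWitness_ind_supra_node : (Int × Int) × (List (Int × List Int)) := ((2, 5), [(4, [1]), (5, [3, 2])])

def Spec_ind_supra_node (supra_node : Int × Int) (t_nodes : List (Int × List Int)) (out : Int) : Prop := out = ind_supra_node_alt supra_node t_nodes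
instance (supra_node : Int × Int) (t_nodes : List (Int × List Int)) (out : Int) : Decidable (Spec_ind_supra_node supra_node t_nodes out) := by unfold Spec_ind_supra_node; infer_instance

-- ===== CLAIM (what is proved, stated in full; the proofs are below) =====
def Claim_equal_ind_supra_node : Prop := ∀ (supra_node : Int × Int) (t_nodes : List (Int × List Int)), Dom_ind_supra_node supra_node t_nodes → Pre_ind_supra_node supra_node t_nodes → Spec_ind_supra_node supra_node t_nodes (ind_supra_node supra_node t_nodes)

-- ===== LEMMAS AND PROOFS =====

-- index? through the (t, ·) pairing is index? of the node itself
theorem pv_index_map_pair (t node : Int) (l : List Int) :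
    PySem.List.index? (l.map (fun x => (t, x))) (t, node) = PySem.List.index? l node := by
  induction l with
  | nil => rfl
  | cons y ys ih =>
    by_cases h : y = node
    · subst h
      rw [List.map_cons, PySem.List.index?_cons_self, PySem.List.index?_cons_self]
    · rw [List.map_cons,
        PySem.List.index?_cons_of_ne _ (show (t, y) ≠ (t, node) by simp [h]),
        PySem.List.index?_cons_of_ne _ h, ih]

-- index? past a prefix the value does not occur in
theorem pv_index_append_of_not_mem {α : Type} [BEq α] [LawfulBEq α] (v : α) (xs ys : List α)
    (h : v ∉ xs) :
    PySem.List.index? (xs ++ ys) v = (PySem.List.index? ys v).map (· + xs.length) := by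
  induction xs with
  | nil => simp
  | cons x xt ih =>
    have hx : x ≠ v := fun e => h (by simp [e])
    rw [List.cons_append, PySem.List.index?_cons_of_ne _ hx,
      ih (fun m => h (by simp [m]))]
    cases PySem.List.index? ys v
    · simp
    · simp; omega

-- B on a non-matching head block: skip its whole length
theorem pv_alt_skip (node t : Int) (b : Int × List Int) (rest : List (Int × List Int))
    (h : b.1 ≠ t) :
    ind_supra_node_alt (node, t) (b :: rest) = (b.2.length : Int) + ind_supra_node_alt (node, t) rest := by
  have hnm : (t, node) ∉ b.2.map (fun x => (b.1, x)) := by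
    simp only [List.mem_map, not_exists]
    rintro x ⟨-, hx⟩
    rw [Prod.mk.injEq] at hx
    exact h hx.1
  simp only [ind_supra_node_alt, pvFlat, List.flatMap_cons]
  rw [pv_index_append_of_not_mem _ _ _ hnm]
  by_cases hm : (t, node) ∈ List.flatMap (fun b => List.map (fun x => (b.1, x)) b.2) rest
  · obtain ⟨k, hk⟩ := Option.isSome_iff_exists.1 ((PySem.List.index?_isSome_iff _ _).2 hm)
    rw [if_pos (List.mem_append.2 (Or.inr hm)), if_pos hm, hk]
    simp only [Option.map_some, Option.getD_some, List.length_map]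
    push_cast; ring
  · rw [if_neg (by simp only [List.mem_append, not_or]; exact ⟨hnm, hm⟩), if_neg hm]
    simp only [List.length_append, List.length_map]
    push_cast; ring

-- B on a matching head block containing the node: index within that block
theorem pv_alt_hit (node t : Int) (b : Int × List Int) (rest : List (Int × List Int))
    (ht : b.1 = t) (hmem : node ∈ b.2) :
    ind_supra_node_alt (node, t) (b :: rest) = (((PySem.List.index? b.2 node).getD 0 : Nat) : Int) := by
  subst ht
  have hmm : (b.1, node) ∈ b.2.map (fun x => (b.1, x)) := List.mem_map.2 ⟨node, hmem, rfl⟩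
  simp only [ind_supra_node_alt, pvFlat, List.flatMap_cons]
  rw [if_pos (List.mem_append.2 (Or.inl hmm)),
    PySem.List.index?_append_of_mem _ hmm, pv_index_map_pair]

-- main loop invariant
theorem pv_loop_eq (node t : Int) (tns : List (Int × List Int)) :
    ∀ ind : Int, Pre_ind_supra_node (node, t) tns →
      pvAloop node t tns ind = ind + ind_supra_node_alt (node, t) tns := by
  induction tns with
  | nil => intro ind _; simp [pvAloop, ind_supra_node_alt, pvFlat]
  | cons b rest ih =>
    intro ind hpre
    by_cases h : b.1 = t
    · have hfind : (b :: rest).find? (fun x => x.1 == (node, t).2) = some b :=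
        by simp [h]
      unfold Pre_ind_supra_node at hpre
      rw [hfind] at hpre
      simp only [Option.all_some] at hpre
      have hmem : node ∈ b.2 := by simpa using hpre
      rw [pv_alt_hit node t b rest h hmem]
      simp [pvAloop, h]
    · have hfind : (b :: rest).find? (fun x => x.1 == (node, t).2) = rest.find? (fun x => x.1 == (node, t).2) :=
        by simp [h]
      have hpre' : Pre_ind_supra_node (node, t) rest := by
        unfold Pre_ind_supra_node at hpre ⊢; rwa [hfind] at hpre
      rw [pv_alt_skip node t b rest h]
      simp only [pvAloop, beq_iff_eq, if_neg h]
      rw [ih _ hpre']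
      ring

-- ===== VERDICT (by name: the statement is the Claim_ definition above) =====
theorem ind_supra_node_spec : Claim_equal_ind_supra_node := by
  intro s tns _ hpre
  unfold Spec_ind_supra_node ind_supra_node
  have := pv_loop_eq s.1 s.2 tns 0 (by simpa using hpre)
  simpa using this
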